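-- pv_equiv track=rewrite | github.com/joshanashakya/dissertation | workspace/dataset/java-python/GeeksForGeeks/3230/A/2.py | maxSumBitonicSubArr
-- ===== SOURCE A (Python) =====
-- def maxSumBitonicSubArr(arr, n):
--
--     # 'msis[]' to store the maximum
--     # sum increasing subarray up to
--     # each index of 'arr' from the
--     # beginning 'msds[]' to store
--     # the maximum sum decreasing
--     # subarray from each index of
--     # 'arr' up to the end
--     msis = [None] * n
--     msds = [None] * n
--
--     # to store the maximum
--     # sum bitonic subarray
--     max_sum = 0
--
--     # building up the maximum
--     # sum increasing subarray
--     # for each array index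
--     msis[0] = arr[0]
--     for i in range(1, n):
--         if (arr[i] > arr[i - 1]):
--             msis[i] = msis[i - 1] + arr[i]
--         else:
--             msis[i] = arr[i]
--
--     # building up the maximum
--     # sum decreasing subarray
--     # for each array index
--     msds[n - 1] = arr[n - 1]
--     for i in range(n - 2, -1, -1):
--         if (arr[i] > arr[i + 1]):
--             msds[i] = msds[i + 1] + arr[i]
--         else:
--             msds[i] = arr[i]
--
--     # for each array index,
--     # calculating the maximum
--     # sum of bitonic subarray
--     # of which it is a part of
--     for i in range(n):
--
--         # if true , then update
--         # 'max' bitonic subarray sum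
--         if (max_sum < (msis[i] +
--                        msds[i] - arr[i])):
--             max_sum = (msis[i] +
--                        msds[i] - arr[i])
--
--     # required maximum sum
--     return max_sum
-- ===== SOURCE B (Python) =====
-- def maxSumBitonicSubArr(arr, n):
--     # Prefix sums: S[k] = arr[0] + ... + arr[k-1].
--     S = [0]
--     for x in arr[:n]:
--         S.append(S[-1] + x)
--     # de[i] = last index of the strictly decreasing run starting at i.
--     de = [0] * n
--     de[n - 1] = n - 1
--     for i in range(n - 2, -1, -1):
--         de[i] = de[i + 1] if arr[i] > arr[i + 1] else i
--     # us = first index of the strictly increasing run ending at i; the bitonic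
--     # window through i is arr[us..de[i]], whose sum is S[de[i]+1] - S[us].
--     best = 0
--     us = 0
--     for i in range(n):
--         if i > 0 and arr[i - 1] >= arr[i]:
--             us = i
--         best = max(best, S[de[i] + 1] - S[us])
--     return best
-- ===== Notes on version B (the rewrite author's own statement) =====
-- stated objective: alternative
-- what changed: B drops A's two running-sum DP arrays (max increasing sum ending at i, max decreasing sum starting at i) and instead builds one prefix-sum array plus the run-boundary index de[i] (end of the strictly decreasing run at i) and a pointer us (start of the strictly increasing run ending at i), evaluating each candidate as the prefix-sum difference S[de[i]+1] - S[us] over the bitonic window [us..de[i]].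
import Mathlib
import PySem

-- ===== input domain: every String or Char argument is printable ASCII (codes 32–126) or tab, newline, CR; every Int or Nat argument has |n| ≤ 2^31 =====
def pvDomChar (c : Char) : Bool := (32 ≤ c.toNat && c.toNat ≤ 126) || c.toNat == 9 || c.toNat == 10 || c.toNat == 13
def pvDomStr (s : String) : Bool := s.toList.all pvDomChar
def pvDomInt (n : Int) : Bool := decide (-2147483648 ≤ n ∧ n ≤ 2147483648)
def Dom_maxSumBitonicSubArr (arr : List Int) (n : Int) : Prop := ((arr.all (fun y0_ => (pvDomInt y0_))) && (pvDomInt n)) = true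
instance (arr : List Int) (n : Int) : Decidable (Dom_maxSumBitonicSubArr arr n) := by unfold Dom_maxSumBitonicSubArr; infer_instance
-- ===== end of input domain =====

-- B replaces A's two running-sum DP arrays by one prefix-sum array plus run-boundary
-- indices (end of the decreasing run, start of the increasing run), evaluating each
-- candidate as a prefix-sum difference (objective: alternative algorithm, same cost).


-- shared total indexing helper: xs[i]; under Pre_ every index used is in range, so the default is never read
def pvGet (arr : List Int) (i : Int) : Int := (PySem.List.pyGet? arr i).getD 0

-- ===== PORT A =====
def maxSumBitonicSubArr (arr : List Int) (n : Int) : Int :=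
  -- msis[0] = arr[0]; for i in range(1, n): …
  let msis : PySem.Dict Int Int :=
    (PySem.List.pyRange 1 n 1).foldl
      (fun m i =>
        if pvGet arr i > pvGet arr (i - 1) then m.insert i (m.getD (i - 1) 0 + pvGet arr i)
        else m.insert i (pvGet arr i))
      (PySem.Dict.empty.insert 0 (pvGet arr 0))
  -- msds[n-1] = arr[n-1]; for i in range(n-2, -1, -1): …
  let msds : PySem.Dict Int Int :=
    (PySem.List.pyRange (n - 2) (-1) (-1)).foldl
      (fun m i =>
        if pvGet arr i > pvGet arr (i + 1) then m.insert i (m.getD (i + 1) 0 + pvGet arr i)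
        else m.insert i (pvGet arr i))
      (PySem.Dict.empty.insert (n - 1) (pvGet arr (n - 1)))
  -- for i in range(n): if max_sum < msis[i] + msds[i] - arr[i]: max_sum = …
  (PySem.List.pyRange 0 n 1).foldl
    (fun mx i =>
      if mx < msis.getD i 0 + msds.getD i 0 - pvGet arr i
      then msis.getD i 0 + msds.getD i 0 - pvGet arr i else mx)
    0

-- ===== PORT B =====
def maxSumBitonicSubArr_alt (arr : List Int) (n : Int) : Int :=
  -- S = [0]; for x in arr[:n]: S.append(S[-1] + x)
  let S : List Int :=
    (PySem.List.slice arr none (some n)).foldl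
      (fun S x => S ++ [(PySem.List.pyGet? S (-1)).getD 0 + x]) [0]
  -- de = [0]*n; de[n-1] = n-1; for i in range(n-2,-1,-1): de[i] = de[i+1] if arr[i] > arr[i+1] else i
  let de : PySem.Dict Int Int :=
    (PySem.List.pyRange (n - 2) (-1) (-1)).foldl
      (fun m i =>
        if pvGet arr i > pvGet arr (i + 1) then m.insert i (m.getD (i + 1) 0) else m.insert i i)
      (PySem.Dict.empty.insert (n - 1) (n - 1))
  -- best = 0; us = 0; for i in range(n): if i > 0 and arr[i-1] >= arr[i]: us = i;
  --                                     best = max(best, S[de[i]+1] - S[us])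
  let r : Int × Int :=
    (PySem.List.pyRange 0 n 1).foldl
      (fun (s : Int × Int) i =>
        let us := if i > 0 ∧ pvGet arr (i - 1) ≥ pvGet arr i then i else s.2
        (max s.1 (pvGet S (de.getD i 0 + 1) - pvGet S us), us))
      (0, 0)
  r.1

-- ===== PRECONDITION & SPEC =====
-- Pre_ excludes exactly the inputs on which A raises an IndexError: n ≤ 0 (the assignment
-- msis[0] = arr[0] on an empty auxiliary list) or n > len(arr) (arr[i] out of range).
def Pre_maxSumBitonicSubArr (arr : List Int) (n : Int) : Prop := 1 ≤ n ∧ n ≤ (arr.length : Int)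
instance (arr : List Int) (n : Int) : Decidable (Pre_maxSumBitonicSubArr arr n) := by unfold Pre_maxSumBitonicSubArr; infer_instance
def pvWitness_maxSumBitonicSubArr : List Int × Int := ([1, 3, 2], 3)

def Spec_maxSumBitonicSubArr (arr : List Int) (n : Int) (out : Int) : Prop := out = maxSumBitonicSubArr_alt arr n
instance (arr : List Int) (n : Int) (out : Int) : Decidable (Spec_maxSumBitonicSubArr arr n out) := by unfold Spec_maxSumBitonicSubArr; infer_instance

-- ===== CLAIM (what is proved, stated in full; the proofs are below) =====
def Claim_equal_maxSumBitonicSubArr : Prop := ∀ (arr : List Int) (n : Int), Dom_maxSumBitonicSubArr arr n → Pre_maxSumBitonicSubArr arr n → Spec_maxSumBitonicSubArr arr n (maxSumBitonicSubArr arr n)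

-- ===== LEMMAS AND PROOFS =====

-- reference value of arr[k] (total; indices stay in range under Pre_)
def pvG (arr : List Int) (k : Nat) : Int := arr.getD k 0

-- msis value at index k
def pvI (arr : List Int) : Nat → Int
  | 0 => pvG arr 0
  | k + 1 => if pvG arr (k + 1) > pvG arr k then pvI arr k + pvG arr (k + 1) else pvG arr (k + 1)

-- msds value at index k, for array length N
def pvD (arr : List Int) (N k : Nat) : Int :=
  if _h : N ≤ k + 1 then pvG arr k
  else if pvG arr k > pvG arr (k + 1) then pvD arr N (k + 1) + pvG arr k else pvG arr k
termination_by N - k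
decreasing_by omega

-- candidate bitonic sum through index k
def pvC (arr : List Int) (N k : Nat) : Int := pvI arr k + pvD arr N k - pvG arr k

-- running maximum of the first k candidates, floored at 0
def pvM (arr : List Int) (N : Nat) : Nat → Int
  | 0 => 0
  | k + 1 => max (pvM arr N k) (pvC arr N k)

-- B's reference quantities: prefix sums, increasing-run start, decreasing-run end
def pvS (arr : List Int) : Nat → Int
  | 0 => 0
  | k + 1 => pvS arr k + pvG arr k

def pvUS (arr : List Int) : Nat → Nat
  | 0 => 0
  | k + 1 => if pvG arr k ≥ pvG arr (k + 1) then k + 1 else pvUS arr k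

def pvDE (arr : List Int) (N k : Nat) : Nat :=
  if _h : N ≤ k + 1 then k
  else if pvG arr k > pvG arr (k + 1) then pvDE arr N (k + 1) else k
termination_by N - k
decreasing_by omega

-- the prefix-sum list B builds: [pvS 0, …, pvS N]
def pvSL (arr : List Int) (N : Nat) : List Int := (List.range (N + 1)).map (pvS arr)

lemma pvGet_natCast (arr : List Int) (k : Nat) : pvGet arr (k : Int) = pvG arr k := by
  simp [pvGet, pvG, PySem.List.pyGet?_natCast, List.getD_eq_getElem?_getD]

lemma pvD_last (arr : List Int) (N k : Nat) (h : N ≤ k + 1) : pvD arr N k = pvG arr k := by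
  rw [pvD]; simp [h]

lemma pvD_rec (arr : List Int) (N k : Nat) (h : k + 1 < N) :
    pvD arr N k = if pvG arr k > pvG arr (k + 1) then pvD arr N (k + 1) + pvG arr k else pvG arr k := by
  rw [pvD]; rw [dif_neg (by omega)]

lemma pvDE_last (arr : List Int) (N k : Nat) (h : N ≤ k + 1) : pvDE arr N k = k := by
  rw [pvDE]; simp [h]

lemma pvDE_rec (arr : List Int) (N k : Nat) (h : k + 1 < N) :
    pvDE arr N k = if pvG arr k > pvG arr (k + 1) then pvDE arr N (k + 1) else k := by
  rw [pvDE]; rw [dif_neg (by omega)]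

lemma pvM_succ (arr : List Int) (N k : Nat) :
    pvM arr N (k + 1) = max (pvM arr N k) (pvC arr N k) := rfl

-- ===== A side =====

lemma msis_aux (arr : List Int) : ∀ (N : Nat) (j : Nat), j < N + 1 →
    (((PySem.List.pyRange 1 ((N : Int) + 1) 1).foldl
      (fun m i =>
        if pvGet arr i > pvGet arr (i - 1) then m.insert i (m.getD (i - 1) 0 + pvGet arr i)
        else m.insert i (pvGet arr i))
      (PySem.Dict.empty.insert 0 (pvGet arr 0))).getD (j : Int) 0) = pvI arr j := by
  intro N
  induction N with
  | zero =>
    intro j hj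
    interval_cases j
    rw [show ((0:Nat):Int) + 1 = 1 by simp, PySem.List.pyRange_one_eq_nil (by omega)]
    simp only [List.foldl_nil, Nat.cast_zero, PySem.Dict.getD_insert_self]
    have h0 : pvGet arr ((0:Nat):Int) = pvG arr 0 := pvGet_natCast arr 0
    simp only [Nat.cast_zero] at h0
    rw [h0]; rfl
  | succ N ih =>
    intro j hj
    rw [show (((N+1:Nat)):Int) + 1 = ((N:Int) + 1) + 1 by push_cast; ring]
    rw [PySem.List.pyRange_one_succ_right (by omega), List.foldl_append]
    simp only [List.foldl_cons, List.foldl_nil]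
    rw [show ((N:Int) + 1 - 1) = ((N:Nat):Int) by ring]
    have hxa : pvGet arr ((N:Int) + 1) = pvG arr (N + 1) := by
      rw [show ((N:Int) + 1) = (((N+1:Nat)):Int) by push_cast; ring, pvGet_natCast]
    have hxb : pvGet arr ((N:Nat):Int) = pvG arr N := pvGet_natCast arr N
    rw [hxa, hxb]
    by_cases hje : j = N + 1
    · subst hje
      rw [show (((N+1:Nat)):Int) = (N:Int) + 1 by push_cast; ring]
      split_ifs with hc
      · rw [PySem.Dict.getD_insert_self, ih N (by omega)]
        simp [pvI, hc]
      · rw [PySem.Dict.getD_insert_self]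
        simp [pvI, hc]
    · have hne : ((j:Nat):Int) ≠ (N:Int) + 1 := by
        have : ((j:Nat):Int) ≠ (((N+1:Nat)):Int) := by
          intro h; exact hje (by exact_mod_cast h)
        simpa using this
      split_ifs with hc
      · rw [PySem.Dict.getD_insert, if_neg hne]; exact ih j (by omega)
      · rw [PySem.Dict.getD_insert, if_neg hne]; exact ih j (by omega)

lemma msis_spec (arr : List Int) (N : Nat) (hN : 1 ≤ N) :
    ∀ j : Nat, j < N →
      (((PySem.List.pyRange 1 (N : Int) 1).foldl
        (fun m i =>
          if pvGet arr i > pvGet arr (i - 1) then m.insert i (m.getD (i - 1) 0 + pvGet arr i)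
          else m.insert i (pvGet arr i))
        (PySem.Dict.empty.insert 0 (pvGet arr 0))).getD (j : Int) 0) = pvI arr j := by
  intro j hj
  rw [show (N:Int) = (((N-1:Nat)):Int) + 1 by omega]
  exact msis_aux arr (N-1) j (by omega)

lemma msds_aux (arr : List Int) (N : Nat) : ∀ (k : Nat), k < N → ∀ d : PySem.Dict Int Int,
    (∀ j : Nat, k ≤ j → j < N → d.getD (j:Int) 0 = pvD arr N j) →
    ∀ j : Nat, j < N →
    ((PySem.List.pyRange ((k:Int) - 1) (-1) (-1)).foldl
      (fun m i =>
        if pvGet arr i > pvGet arr (i + 1) then m.insert i (m.getD (i + 1) 0 + pvGet arr i)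
        else m.insert i (pvGet arr i)) d).getD (j:Int) 0 = pvD arr N j := by
  intro k
  induction k with
  | zero =>
    intro _ d hd j hj
    rw [show ((0:Nat):Int) - 1 = (-1 : Int) by simp, PySem.List.pyRange_neg_one_eq_nil (le_refl _)]
    exact hd j (Nat.zero_le j) hj
  | succ k ih =>
    intro hk d hd j hj
    rw [show (((k+1:Nat)):Int) - 1 = ((k:Nat):Int) by push_cast; ring]
    rw [PySem.List.pyRange_neg_one_cons (by omega), List.foldl_cons]
    refine ih (by omega) _ ?_ j hj
    intro j' hj1 hj2
    have hx : pvGet arr ((k:Nat):Int) = pvG arr k := pvGet_natCast arr k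
    have hx1 : pvGet arr (((k:Nat):Int) + 1) = pvG arr (k+1) := by
      rw [show ((k:Nat):Int) + 1 = (((k+1:Nat)):Int) by push_cast; ring, pvGet_natCast]
    have hd1 : d.getD (((k:Nat):Int) + 1) 0 = pvD arr N (k+1) := by
      rw [show ((k:Nat):Int) + 1 = (((k+1:Nat)):Int) by push_cast; ring]
      exact hd (k+1) (le_refl _) (by omega)
    by_cases hje : j' = k
    · subst hje
      rw [hx, hx1]
      split_ifs with hc
      · rw [PySem.Dict.getD_insert_self, hd1, pvD_rec arr N j' (by omega), if_pos hc]
      · rw [PySem.Dict.getD_insert_self, pvD_rec arr N j' (by omega), if_neg hc]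
    · have hne : ((j':Nat):Int) ≠ ((k:Nat):Int) := by
        intro h; exact hje (by exact_mod_cast h)
      split_ifs with hc
      · rw [PySem.Dict.getD_insert, if_neg hne]; exact hd j' (by omega) hj2
      · rw [PySem.Dict.getD_insert, if_neg hne]; exact hd j' (by omega) hj2

lemma msds_spec (arr : List Int) (N : Nat) (hN : 1 ≤ N) :
    ∀ j : Nat, j < N →
      (((PySem.List.pyRange ((N : Int) - 2) (-1) (-1)).foldl
        (fun m i =>
          if pvGet arr i > pvGet arr (i + 1) then m.insert i (m.getD (i + 1) 0 + pvGet arr i)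
          else m.insert i (pvGet arr i))
        (PySem.Dict.empty.insert ((N : Int) - 1) (pvGet arr ((N : Int) - 1)))).getD (j : Int) 0) = pvD arr N j := by
  intro j hj
  rw [show (N:Int) - 2 = (((N-1:Nat)):Int) - 1 by omega]
  rw [show (N:Int) - 1 = (((N-1:Nat)):Int) by omega]
  refine msds_aux arr N (N-1) (by omega) _ ?_ j hj
  intro j' h1' h2'
  have hj' : j' = N - 1 := by omega
  subst hj'
  rw [PySem.Dict.getD_insert_self, pvGet_natCast, pvD_last arr N (N-1) (by omega)]

lemma loop3_aux (arr : List Int) (N : Nat) (d1 d2 : PySem.Dict Int Int)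
    (h1 : ∀ j : Nat, j < N → d1.getD (j:Int) 0 = pvI arr j)
    (h2 : ∀ j : Nat, j < N → d2.getD (j:Int) 0 = pvD arr N j) :
    ∀ k : Nat, k ≤ N →
    ((PySem.List.pyRange 0 (k:Int) 1).foldl
      (fun mx i =>
        if mx < d1.getD i 0 + d2.getD i 0 - pvGet arr i
        then d1.getD i 0 + d2.getD i 0 - pvGet arr i else mx) 0) = pvM arr N k := by
  intro k
  induction k with
  | zero =>
    rw [show ((0:Nat):Int) = 0 by simp, PySem.List.pyRange_one_eq_nil (le_refl _)]
    intro _; rfl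
  | succ k ih =>
    intro hk
    rw [show (((k+1:Nat)):Int) = ((k:Nat):Int) + 1 by push_cast; ring]
    rw [PySem.List.pyRange_one_succ_right (by omega), List.foldl_append]
    simp only [List.foldl_cons, List.foldl_nil]
    rw [ih (by omega), h1 k (by omega), h2 k (by omega), pvGet_natCast]
    have hc : pvI arr k + pvD arr N k - pvG arr k = pvC arr N k := rfl
    rw [hc, pvM_succ]
    split_ifs with h <;> omega

lemma portA_eq (arr : List Int) (N : Nat) (hN : 1 ≤ N) (hlen : N ≤ arr.length) :
    maxSumBitonicSubArr arr (N : Int) = pvM arr N N := by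
  simp only [maxSumBitonicSubArr]
  exact loop3_aux arr N _ _ (msis_spec arr N hN) (msds_spec arr N hN) N (le_refl N)

-- ===== B side =====

lemma pvUS_le (arr : List Int) : ∀ k, pvUS arr k ≤ k := by
  intro k
  induction k with
  | zero => simp [pvUS]
  | succ k ih => rw [pvUS]; split_ifs <;> omega

lemma pvDE_lt (arr : List Int) (N : Nat) : ∀ m k, N ≤ k + m → k < N → pvDE arr N k < N := by
  intro m
  induction m with
  | zero => intro k h1 h2; omega
  | succ m ih =>
    intro k h1 h2
    by_cases h : N ≤ k + 1
    · rw [pvDE_last arr N k h]; exact h2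
    · rw [pvDE_rec arr N k (by omega)]
      split_ifs with hc
      · exact ih (k+1) (by omega) (by omega)
      · exact h2

-- the increasing-run sum is a prefix-sum difference from the run start
lemma pvI_S (arr : List Int) : ∀ k, pvI arr k = pvS arr (k + 1) - pvS arr (pvUS arr k) := by
  intro k
  induction k with
  | zero => simp [pvI, pvUS, pvS]
  | succ k ih =>
    have hs : pvS arr (k + 1 + 1) = pvS arr (k + 1) + pvG arr (k + 1) := rfl
    have hs' : pvS arr (k + 1) = pvS arr k + pvG arr k := rfl
    rw [pvI, pvUS]
    by_cases hc : pvG arr (k + 1) > pvG arr k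
    · rw [if_pos hc, if_neg (by omega), ih]; omega
    · rw [if_neg hc, if_pos (by omega)]; omega

-- the decreasing-run sum is a prefix-sum difference up to the run end
lemma pvD_S (arr : List Int) (N : Nat) : ∀ m k, N ≤ k + m → k < N →
    pvD arr N k = pvS arr (pvDE arr N k + 1) - pvS arr k := by
  intro m
  induction m with
  | zero => intro k h1 h2; omega
  | succ m ih =>
    intro k h1 h2
    have hs : pvS arr (k + 1) = pvS arr k + pvG arr k := rfl
    by_cases h : N ≤ k + 1
    · rw [pvD_last arr N k h, pvDE_last arr N k h]; omega
    · rw [pvD_rec arr N k (by omega), pvDE_rec arr N k (by omega)]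
      split_ifs with hc
      · rw [ih (k+1) (by omega) (by omega)]; omega
      · omega

-- the candidate at k is the prefix-sum difference over the bitonic window [us..de]
lemma pvC_S (arr : List Int) (N k : Nat) (hk : k < N) :
    pvS arr (pvDE arr N k + 1) - pvS arr (pvUS arr k) = pvC arr N k := by
  have h1 := pvI_S arr k
  have h2 := pvD_S arr N N k (by omega) hk
  have hs : pvS arr (k + 1) = pvS arr k + pvG arr k := rfl
  rw [pvC]; omega

-- the fold building S produces the prefix-sum list
lemma S_fold (arr : List Int) : ∀ k, k ≤ arr.length →
    ((arr.take k).foldl (fun S x => S ++ [(PySem.List.pyGet? S (-1)).getD 0 + x]) [0]) = pvSL arr k := by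
  intro k
  induction k with
  | zero => intro _; simp [pvSL, List.range_one]; rfl
  | succ k ih =>
    intro hk
    rw [List.take_add_one, List.getElem?_eq_getElem (by omega : k < arr.length)]
    simp only [Option.toList_some]
    rw [List.foldl_append]
    simp only [List.foldl_cons, List.foldl_nil]
    rw [ih (by omega)]
    have hlast : (PySem.List.pyGet? (pvSL arr k) (-1)).getD 0 = pvS arr k := by
      rw [PySem.List.pyGet?_neg_one]
      have : pvSL arr k = (List.range k).map (pvS arr) ++ [pvS arr k] := by
        simp [pvSL, List.range_succ]
      rw [this, List.getLast?_concat]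
      rfl
    rw [hlast]
    have hk' : k < arr.length := by omega
    simp [pvSL, List.range_succ, pvS, pvG, List.getD_eq_getElem?_getD, List.getElem?_eq_getElem hk']

lemma pvSL_get (arr : List Int) (N j : Nat) (hj : j ≤ N) : pvGet (pvSL arr N) (j : Int) = pvS arr j := by
  rw [pvGet_natCast]
  show (pvSL arr N).getD j 0 = pvS arr j
  rw [pvSL, List.getD_eq_getElem?_getD, List.getElem?_map, List.getElem?_range (by omega)]
  rfl

lemma de_aux (arr : List Int) (N : Nat) : ∀ (k : Nat), k < N → ∀ d : PySem.Dict Int Int,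
    (∀ j : Nat, k ≤ j → j < N → d.getD (j:Int) 0 = ((pvDE arr N j : Nat) : Int)) →
    ∀ j : Nat, j < N →
    ((PySem.List.pyRange ((k:Int) - 1) (-1) (-1)).foldl
      (fun m i =>
        if pvGet arr i > pvGet arr (i + 1) then m.insert i (m.getD (i + 1) 0) else m.insert i i)
      d).getD (j:Int) 0 = ((pvDE arr N j : Nat) : Int) := by
  intro k
  induction k with
  | zero =>
    intro _ d hd j hj
    rw [show ((0:Nat):Int) - 1 = (-1 : Int) by simp, PySem.List.pyRange_neg_one_eq_nil (le_refl _)]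
    exact hd j (Nat.zero_le j) hj
  | succ k ih =>
    intro hk d hd j hj
    rw [show (((k+1:Nat)):Int) - 1 = ((k:Nat):Int) by push_cast; ring]
    rw [PySem.List.pyRange_neg_one_cons (by omega), List.foldl_cons]
    refine ih (by omega) _ ?_ j hj
    intro j' hj1 hj2
    have hx : pvGet arr ((k:Nat):Int) = pvG arr k := pvGet_natCast arr k
    have hx1 : pvGet arr (((k:Nat):Int) + 1) = pvG arr (k+1) := by
      rw [show ((k:Nat):Int) + 1 = (((k+1:Nat)):Int) by push_cast; ring, pvGet_natCast]
    have hd1 : d.getD (((k:Nat):Int) + 1) 0 = ((pvDE arr N (k+1) : Nat) : Int) := by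
      rw [show ((k:Nat):Int) + 1 = (((k+1:Nat)):Int) by push_cast; ring]
      exact hd (k+1) (le_refl _) (by omega)
    by_cases hje : j' = k
    · subst hje
      rw [hx, hx1]
      split_ifs with hc
      · rw [PySem.Dict.getD_insert_self, hd1, pvDE_rec arr N j' (by omega), if_pos hc]
      · rw [PySem.Dict.getD_insert_self, pvDE_rec arr N j' (by omega), if_neg hc]
    · have hne : ((j':Nat):Int) ≠ ((k:Nat):Int) := by
        intro h; exact hje (by exact_mod_cast h)
      split_ifs with hc
      · rw [PySem.Dict.getD_insert, if_neg hne]; exact hd j' (by omega) hj2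
      · rw [PySem.Dict.getD_insert, if_neg hne]; exact hd j' (by omega) hj2

lemma de_spec (arr : List Int) (N : Nat) (hN : 1 ≤ N) :
    ∀ j : Nat, j < N →
      (((PySem.List.pyRange ((N : Int) - 2) (-1) (-1)).foldl
        (fun m i =>
          if pvGet arr i > pvGet arr (i + 1) then m.insert i (m.getD (i + 1) 0) else m.insert i i)
        (PySem.Dict.empty.insert ((N : Int) - 1) ((N : Int) - 1))).getD (j : Int) 0) = ((pvDE arr N j : Nat) : Int) := by
  intro j hj
  rw [show (N:Int) - 2 = (((N-1:Nat)):Int) - 1 by omega]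
  rw [show (N:Int) - 1 = (((N-1:Nat)):Int) by omega]
  refine de_aux arr N (N-1) (by omega) _ ?_ j hj
  intro j' h1' h2'
  have hj' : j' = N - 1 := by omega
  subst hj'
  rw [PySem.Dict.getD_insert_self, pvDE_last arr N (N-1) (by omega)]

lemma loopB_aux (arr : List Int) (N : Nat) (L : List Int) (d : PySem.Dict Int Int)
    (hL : ∀ j : Nat, j ≤ N → pvGet L (j:Int) = pvS arr j)
    (hd : ∀ j : Nat, j < N → d.getD (j:Int) 0 = ((pvDE arr N j : Nat) : Int)) :
    ∀ k : Nat, k ≤ N →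
    ((PySem.List.pyRange 0 (k:Int) 1).foldl
      (fun (s : Int × Int) i =>
        let us := if i > 0 ∧ pvGet arr (i - 1) ≥ pvGet arr i then i else s.2
        (max s.1 (pvGet L (d.getD i 0 + 1) - pvGet L us), us))
      (0, 0)) = (pvM arr N k, ((pvUS arr (k - 1) : Nat) : Int)) := by
  intro k
  induction k with
  | zero =>
    intro _
    rw [show ((0:Nat):Int) = 0 by simp, PySem.List.pyRange_one_eq_nil (le_refl _)]
    simp [pvM, pvUS]
  | succ k ih =>
    intro hk
    rw [show (((k+1:Nat)):Int) = ((k:Nat):Int) + 1 by push_cast; ring]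
    rw [PySem.List.pyRange_one_succ_right (by omega), List.foldl_append]
    simp only [List.foldl_cons, List.foldl_nil]
    rw [ih (by omega)]
    have hus : (if ((k:Nat):Int) > 0 ∧ pvGet arr (((k:Nat):Int) - 1) ≥ pvGet arr ((k:Nat):Int)
        then ((k:Nat):Int) else ((pvUS arr (k - 1) : Nat) : Int)) = ((pvUS arr k : Nat) : Int) := by
      cases k with
      | zero => simp [pvUS]
      | succ j =>
        rw [show (((j+1:Nat)):Int) - 1 = ((j:Nat):Int) by push_cast; ring]
        rw [pvGet_natCast, show pvGet arr (((j+1:Nat)):Int) = pvG arr (j+1) from pvGet_natCast arr (j+1)]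
        simp only [Nat.add_sub_cancel]
        rw [pvUS]
        by_cases hc : pvG arr j ≥ pvG arr (j + 1)
        · rw [if_pos ⟨by exact_mod_cast Nat.succ_pos j, hc⟩, if_pos hc]
        · rw [if_neg (by tauto), if_neg hc]
    rw [hus]
    have hde : d.getD ((k:Nat):Int) 0 + 1 = (((pvDE arr N k + 1 : Nat)) : Int) := by
      rw [hd k (by omega)]; push_cast; ring
    rw [hde, hL (pvDE arr N k + 1) (by have := pvDE_lt arr N N k (by omega) (by omega); omega)]
    rw [hL (pvUS arr k) (le_trans (pvUS_le arr k) (by omega))]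
    rw [pvC_S arr N k (by omega), pvM_succ]
    simp

lemma portB_eq (arr : List Int) (N : Nat) (hN : 1 ≤ N) (hlen : N ≤ arr.length) :
    maxSumBitonicSubArr_alt arr (N : Int) = pvM arr N N := by
  simp only [maxSumBitonicSubArr_alt, PySem.List.slice_to_natCast]
  rw [S_fold arr N hlen]
  have h := loopB_aux arr N (pvSL arr N) _ (fun j hj => pvSL_get arr N j hj) (de_spec arr N hN) N (le_refl N)
  rw [h]

-- ===== VERDICT (by name: the statement is the Claim_ definition above) =====
theorem maxSumBitonicSubArr_spec : Claim_equal_maxSumBitonicSubArr := by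
  intro arr n _ hpre
  obtain ⟨h1, h2⟩ := hpre
  unfold Spec_maxSumBitonicSubArr
  rw [show n = ((n.toNat : Nat) : Int) by omega]
  rw [portA_eq arr n.toNat (by omega) (by omega), portB_eq arr n.toNat (by omega) (by omega)]
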